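-- pv_equiv track=rewrite | github.com/Adnene93/FSSD | FSSD/enumerator/enumerator_attribute_hmt.py | flattenThemesTree
-- ===== SOURCE A (Python) =====
-- def flattenThemesTree(themes):
--     arrNew=[]
--     for x in themes :
--         s= x.split('.')
--
--         for i in range(len(s)) :
--             sub=''
--             for j in range(i+1):
--                 sub+=s[j]+'.'
--             sub=sub[:-1]
--             if sub not in arrNew :
--                 arrNew.append(sub)
--     arrNew.append('')
--     arrNew.sort()
--     return arrNew
-- ===== SOURCE B (Python) =====
-- def flattenThemesTree(themes):
--     # One pass: running dotted prefix per theme (no nested index loops), set for dedup.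
--     seen = set()
--     for x in themes:
--         acc = None
--         for seg in x.split('.'):
--             acc = seg if acc is None else acc + '.' + seg
--             seen.add(acc)
--     return sorted(list(seen) + [''])
-- ===== Notes on version B (the rewrite author's own statement) =====
-- stated objective: faster
-- what changed: Replaces A's nested index loops (rebuilding each dotted prefix from scratch) and its 'sub not in arrNew' linear list scan by a single pass that extends a running prefix per segment and dedupes with a set, then sorts.
import Mathlib
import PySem

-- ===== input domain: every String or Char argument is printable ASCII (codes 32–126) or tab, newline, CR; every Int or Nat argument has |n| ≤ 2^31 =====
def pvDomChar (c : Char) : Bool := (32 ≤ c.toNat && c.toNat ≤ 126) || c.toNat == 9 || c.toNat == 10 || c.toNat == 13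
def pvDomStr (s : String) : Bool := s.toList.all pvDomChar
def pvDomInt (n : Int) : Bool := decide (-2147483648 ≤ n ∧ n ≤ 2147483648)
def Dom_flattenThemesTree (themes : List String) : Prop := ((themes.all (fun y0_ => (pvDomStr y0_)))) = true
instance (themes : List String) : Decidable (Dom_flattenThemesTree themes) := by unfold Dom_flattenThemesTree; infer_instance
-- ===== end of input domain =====

-- B replaces A's nested index loops and list-membership dedup by one pass with a running
-- dotted prefix and a set, then sorts; measurably faster (no O(n^2) list scans / prefix rebuilds).


-- ===== PORT A =====
-- x.split('.') has a nonempty separator, so PySem.Str.split? is always `some`; `.getD []` is exact.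
def flattenThemesTree (themes : List String) : List String :=
  let arrNew : List String :=
    themes.foldl (fun arrNew x =>
      let s := (PySem.Str.split? x ".").getD []
      (PySem.List.pyRange 0 (s.length : Int) 1).foldl (fun arrNew i =>
        let sub : String :=
          (PySem.List.pyRange 0 (i + 1) 1).foldl
            (fun sub j => PySem.Str.join "" [sub, PySem.List.pyGetD s j "", "."]) ""
        let sub := PySem.Str.slice sub none (some (-1))
        if (arrNew.contains sub) = false then arrNew ++ [sub] else arrNew) arrNew) []
  PySem.List.sorted (arrNew ++ [""]) (fun y => y) false

-- ===== PORT B =====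
def flattenThemesTree_alt (themes : List String) : List String :=
  let seen : PySem.Set String :=
    themes.foldl (fun seen x =>
      (((PySem.Str.split? x ".").getD []).foldl
        (fun (st : Option String × PySem.Set String) seg =>
          let acc : String :=
            match st.1 with
            | none => seg
            | some a => PySem.Str.join "" [a, ".", seg]
          (some acc, PySem.Set.add st.2 acc)) ((none : Option String), seen)).2) ([] : PySem.Set String)
  PySem.List.sorted (seen ++ [""]) (fun y => y) false

-- ===== PRECONDITION & SPEC =====
def Spec_flattenThemesTree (themes : List String) (out : List String) : Prop := out = flattenThemesTree_alt themes
instance (themes : List String) (out : List String) : Decidable (Spec_flattenThemesTree themes out) := by unfold Spec_flattenThemesTree; infer_instance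

-- ===== CLAIM (what is proved, stated in full; the proofs are below) =====
def Claim_equal_flattenThemesTree : Prop := ∀ (themes : List String), Dom_flattenThemesTree themes → Spec_flattenThemesTree themes (flattenThemesTree themes)

-- ===== LEMMAS AND PROOFS =====

-- first-occurrence insert, the common shape of A's membership-append and PySem.Set.add
def pvAdd (arr : List String) (p : String) : List String :=
  if arr.contains p = true then arr else arr ++ [p]

def pvDot (a b : String) : String := PySem.Str.join "" [a, ".", b]

-- the dotted prefixes a.c1, a.c1.c2, … extended from running prefix a
def pvScan (a : String) : List String → List String
  | [] => []
  | c :: rest => pvDot a c :: pvScan (pvDot a c) rest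

-- all dotted prefixes of a segment list
def pvPrefs : List String → List String
  | [] => []
  | c :: rest => c :: pvScan c rest

-- the raw char stream A's inner loop builds: each segment followed by '.'
def pvRaw (l : List String) : List Char := (l.map (fun t => t.toList ++ ['.'])).flatten

def pvSubRaw (s : List String) (n : Nat) : String :=
  (List.range n).foldl (fun sub j => PySem.Str.join "" [sub, s.getD j "", "."]) ""

lemma pvJoin3 (a b c : String) :
    (PySem.Str.join "" [a, b, c]).toList = a.toList ++ b.toList ++ c.toList := by
  simp [PySem.Str.toList_join, PySem.Chars.join, List.intercalate]

lemma pvDot_toList (a c : String) : (pvDot a c).toList = a.toList ++ '.' :: c.toList := by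
  have := pvJoin3 a "." c
  simpa [pvDot] using this

lemma pvRaw_append_singleton (l : List String) (c : String) :
    pvRaw (l ++ [c]) = pvRaw l ++ c.toList ++ ['.'] := by
  simp [pvRaw]

lemma pvRaw_eq_concat : ∀ l : List String, l ≠ [] → ∃ q, pvRaw l = q ++ ['.']
  | [], h => absurd rfl h
  | c :: rest, _ => by
    cases hr : rest with
    | nil => exact ⟨c.toList, by simp [pvRaw]⟩
    | cons d tl =>
      obtain ⟨q', hq'⟩ := pvRaw_eq_concat rest (by simp [hr])
      refine ⟨c.toList ++ '.' :: q', ?_⟩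
      subst hr
      have h1 : pvRaw (c :: d :: tl) = c.toList ++ ['.'] ++ pvRaw (d :: tl) := by simp [pvRaw]
      rw [h1, hq']
      simp

lemma pvRaw_dropLast_dot (l : List String) (h : l ≠ []) :
    (pvRaw l).dropLast ++ ['.'] = pvRaw l := by
  obtain ⟨q, hq⟩ := pvRaw_eq_concat l h
  rw [hq, List.dropLast_concat]

lemma pvSubRaw_toList (s : List String) (n : Nat) (hn : n ≤ s.length) :
    (pvSubRaw s n).toList = pvRaw (s.take n) := by
  induction n with
  | zero => simp [pvSubRaw, pvRaw]
  | succ n ih =>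
    have hlt : n < s.length := hn
    have hstep : pvSubRaw s (n + 1)
        = PySem.Str.join "" [pvSubRaw s n, s.getD n "", "."] := by
      simp [pvSubRaw, List.range_succ]
    rw [hstep]
    have h3 := pvJoin3 (pvSubRaw s n) (s.getD n "") "."
    rw [h3, ih (Nat.le_of_lt hlt)]
    have hgd : s.getD n "" = s[n] := List.getD_eq_getElem s "" hlt
    have htk : s.take (n + 1) = s.take n ++ [s[n]] := by
      rw [List.take_add_one]
      simp [List.getElem?_eq_getElem hlt]
    rw [hgd, htk, pvRaw_append_singleton]
    simp

lemma pvDot_dropLast (a c : String) (pre : List String) (hpre : pre ≠ [])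
    (ha : a.toList = (pvRaw pre).dropLast) :
    (pvDot a c).toList = (pvRaw (pre ++ [c])).dropLast := by
  rw [pvDot_toList, ha, pvRaw_append_singleton,
    show pvRaw pre ++ c.toList ++ ['.'] = (pvRaw pre ++ c.toList) ++ ['.'] by simp,
    List.dropLast_concat,
    show (pvRaw pre).dropLast ++ '.' :: c.toList = ((pvRaw pre).dropLast ++ ['.']) ++ c.toList by simp,
    pvRaw_dropLast_dot pre hpre]

lemma pvScan_eq_map (rest : List String) (a : String) (pre : List String)
    (hpre : pre ≠ []) (ha : a.toList = (pvRaw pre).dropLast) :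
    pvScan a rest = (List.range rest.length).map
      (fun k => String.ofList ((pvRaw (pre ++ rest.take (k+1))).dropLast)) := by
  induction rest generalizing a pre with
  | nil => simp [pvScan]
  | cons c tl ih =>
    have hdot := pvDot_dropLast a c pre hpre ha
    rw [pvScan, List.length_cons, List.range_succ_eq_map, List.map_cons, List.map_map]
    congr 1
    · rw [show (c :: tl).take (0 + 1) = [c] by simp, ← hdot, String.ofList_toList]
    · rw [ih (pvDot a c) (pre ++ [c]) (by simp) hdot]
      apply List.map_congr_left
      intro k hk
      simp only [Function.comp_apply, Nat.succ_eq_add_one]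
      congr 2
      rw [show (c :: tl).take (k + 1 + 1) = c :: tl.take (k + 1) from rfl]
      simp

lemma pvPrefs_eq_map (s : List String) :
    pvPrefs s = (List.range s.length).map
      (fun k => String.ofList ((pvRaw (s.take (k+1))).dropLast)) := by
  cases s with
  | nil => simp [pvPrefs]
  | cons c rest =>
    have hc : c.toList = (pvRaw [c]).dropLast := by
      simp [pvRaw]
    rw [pvPrefs, List.length_cons, List.range_succ_eq_map, List.map_cons, List.map_map]
    congr 1
    · rw [show (c :: rest).take (0 + 1) = [c] by simp, ← hc, String.ofList_toList]
    · rw [pvScan_eq_map rest c [c] (by simp) hc]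
      apply List.map_congr_left
      intro k hk
      simp only [Function.comp_apply, Nat.succ_eq_add_one]
      congr 2

-- A's per-theme loop = fold of pvAdd over the prefix list
lemma pvBodyA (arr : List String) (s : List String) :
    (PySem.List.pyRange 0 (s.length : Int) 1).foldl (fun arrNew i =>
        let sub : String :=
          (PySem.List.pyRange 0 (i + 1) 1).foldl
            (fun sub j => PySem.Str.join "" [sub, PySem.List.pyGetD s j "", "."]) ""
        let sub := PySem.Str.slice sub none (some (-1))
        if (arrNew.contains sub) = false then arrNew ++ [sub] else arrNew) arr
      = List.foldl pvAdd arr (pvPrefs s) := by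
  rw [PySem.List.pyRange_zero_nat, List.foldl_map]
  rw [PySem.List.foldl_congr_mem (List.range s.length) _
    (fun arrNew k => pvAdd arrNew (String.ofList ((pvRaw (s.take (k+1))).dropLast))) arr ?_]
  · rw [← List.foldl_map (f := fun k => String.ofList ((pvRaw (s.take (k+1))).dropLast)) (g := pvAdd),
      ← pvPrefs_eq_map]
  · intro arrNew k hk
    have hk' : k < s.length := List.mem_range.mp hk
    have hcast : ((k : Int) + 1) = (((k + 1 : Nat)) : Int) := by push_cast; ring
    simp only [hcast, PySem.List.pyRange_zero_nat, List.foldl_map, PySem.List.pyGetD_natCast]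
    have hsub : PySem.Str.slice (pvSubRaw s (k+1)) none (some (-1))
        = String.ofList ((pvRaw (s.take (k+1))).dropLast) := by
      rw [← String.toList_inj, PySem.Str.slice_to_neg_one,
        pvSubRaw_toList s (k+1) hk', String.toList_ofList]
    show (if ((arrNew.contains (PySem.Str.slice (pvSubRaw s (k+1)) none (some (-1)))) = false)
        then arrNew ++ [PySem.Str.slice (pvSubRaw s (k+1)) none (some (-1))] else arrNew)
      = pvAdd arrNew (String.ofList ((pvRaw (s.take (k+1))).dropLast))
    rw [hsub]
    simp [pvAdd]

-- B's inner fold, generalized: running prefix some a, set accumulates pvScan a segs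
lemma pvStepB (segs : List String) : ∀ (a : String) (seen : List String),
    segs.foldl
        (fun (st : Option String × PySem.Set String) seg =>
          let acc : String :=
            match st.1 with
            | none => seg
            | some a => PySem.Str.join "" [a, ".", seg]
          (some acc, PySem.Set.add st.2 acc)) ((some a : Option String), seen)
      = (some (segs.foldl pvDot a), List.foldl pvAdd seen (pvScan a segs)) := by
  induction segs with
  | nil => intro a seen; simp [pvScan]
  | cons c tl ih =>
    intro a seen
    rw [List.foldl_cons]
    show tl.foldl _ ((some (pvDot a c) : Option String), PySem.Set.add seen (pvDot a c)) = _
    rw [ih (pvDot a c) (PySem.Set.add seen (pvDot a c))]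
    rfl

-- B's per-theme loop = fold of pvAdd over the same prefix list
lemma pvBodyB (seen : List String) (s : List String) :
    (s.foldl
        (fun (st : Option String × PySem.Set String) seg =>
          let acc : String :=
            match st.1 with
            | none => seg
            | some a => PySem.Str.join "" [a, ".", seg]
          (some acc, PySem.Set.add st.2 acc)) ((none : Option String), seen)).2
      = List.foldl pvAdd seen (pvPrefs s) := by
  cases s with
  | nil => rfl
  | cons c rest =>
    rw [List.foldl_cons]
    show (rest.foldl _ ((some c : Option String), PySem.Set.add seen c)).2 = _
    rw [pvStepB rest c (PySem.Set.add seen c)]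
    rfl

-- ===== VERDICT (by name: the statement is the Claim_ definition above) =====
theorem flattenThemesTree_spec : Claim_equal_flattenThemesTree := by
  intro themes _
  unfold Spec_flattenThemesTree flattenThemesTree flattenThemesTree_alt
  have h : (fun (arrNew : List String) (x : String) =>
      (PySem.List.pyRange 0 ((((PySem.Str.split? x ".").getD []).length : Int)) 1).foldl
        (fun arrNew i =>
          let sub : String :=
            (PySem.List.pyRange 0 (i + 1) 1).foldl
              (fun sub j =>
                PySem.Str.join "" [sub, PySem.List.pyGetD ((PySem.Str.split? x ".").getD []) j "", "."]) ""
          let sub := PySem.Str.slice sub none (some (-1))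
          if (arrNew.contains sub) = false then arrNew ++ [sub] else arrNew) arrNew)
      = (fun (seen : List String) (x : String) =>
        (((PySem.Str.split? x ".").getD []).foldl
          (fun (st : Option String × PySem.Set String) seg =>
            let acc : String :=
              match st.1 with
              | none => seg
              | some a => PySem.Str.join "" [a, ".", seg]
            (some acc, PySem.Set.add st.2 acc)) ((none : Option String), seen)).2) := by
    funext arr x
    exact (pvBodyA arr ((PySem.Str.split? x ".").getD [])).trans
      (pvBodyB arr ((PySem.Str.split? x ".").getD [])).symm
  simp only [h]
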